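-- pv_equiv track=rewrite | github.com/psrc/urbansim | opus_core/model_component_creator.py | get_subdirectory
-- ===== SOURCE A (Python) =====
-- def get_subdirectory(operation_name):
--     """Extract subdirectory from an operation name. E.g. if operation_name is 'opus_core.operations.uilities', it
--     returns 'operations'.
--     """
--     if (operation_name == None):
--         return None
--     words = operation_name.split(".")
--     dir = ""
--     for iw in range(1,len(words)-1):
--         dir=dir + words[iw]
--         if iw < len(words)-2:
--             dir=dir+"."
--     return  dir
-- ===== SOURCE B (Python) =====
-- def get_subdirectory(operation_name):
--     if operation_name is None:
--         return None
--     first = operation_name.find(".")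
--     if first == -1:
--         return ""
--     last = operation_name.rfind(".")
--     return operation_name[first + 1:last]
-- ===== Notes on version B (the rewrite author's own statement) =====
-- stated objective: idiomatic
-- what changed: Replaces splitting into a word list and rebuilding the middle in an index loop with direct index arithmetic: find the first and last dot and return the substring between them.
import Mathlib
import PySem

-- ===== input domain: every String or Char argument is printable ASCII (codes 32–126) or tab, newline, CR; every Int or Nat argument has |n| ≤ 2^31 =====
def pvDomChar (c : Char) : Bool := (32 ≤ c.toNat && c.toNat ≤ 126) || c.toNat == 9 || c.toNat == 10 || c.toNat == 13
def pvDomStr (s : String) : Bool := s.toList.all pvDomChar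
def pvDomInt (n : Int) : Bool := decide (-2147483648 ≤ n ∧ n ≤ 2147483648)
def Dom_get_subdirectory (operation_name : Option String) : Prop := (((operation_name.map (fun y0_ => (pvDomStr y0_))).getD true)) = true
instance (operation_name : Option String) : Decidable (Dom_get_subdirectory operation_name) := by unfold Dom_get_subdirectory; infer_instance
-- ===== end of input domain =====

-- B replaces A's split-into-words-and-rebuild loop with direct index arithmetic
-- (find the first and last dot, return the substring between them); same O(n) cost.

-- ===== PORT A =====
-- Transliteration at the List Char level (PySem.Chars.* are the exact forms of the
-- str operations); words[iw] is always in range in A's loop, so pyGetD is exact.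
def get_subdirectory_core (cs : List Char) : List Char :=
  let words := PySem.Chars.splitOn cs ['.']          -- operation_name.split(".")
  let n : Int := words.length
  (PySem.List.pyRange 1 (n - 1) 1).foldl             -- for iw in range(1, len(words)-1)
    (fun dir iw =>
      let dir2 := dir ++ PySem.List.pyGetD words iw []   -- dir = dir + words[iw]
      if iw < n - 2 then dir2 ++ ['.'] else dir2)        -- if iw < len(words)-2: dir += "."
    []

def get_subdirectory (operation_name : Option String) : Option String :=
  match operation_name with
  | none => none                                      -- if operation_name == None: return None
  | some s => some (String.ofList (get_subdirectory_core s.toList))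

-- ===== PORT B =====
def get_subdirectory_alt_core (cs : List Char) : List Char :=
  let first := PySem.Chars.find cs ['.']              -- operation_name.find(".")
  if first = -1 then []                               -- return ""
  else PySem.Chars.slice cs (some (first + 1)) (some (PySem.Chars.rfind cs ['.']))
                                                      -- operation_name[first+1:last]
def get_subdirectory_alt (operation_name : Option String) : Option String :=
  match operation_name with
  | none => none
  | some s => some (String.ofList (get_subdirectory_alt_core s.toList))

-- ===== PRECONDITION & SPEC =====
def Spec_get_subdirectory (operation_name : Option String) (out : Option String) : Prop := out = get_subdirectory_alt operation_name
instance (operation_name : Option String) (out : Option String) : Decidable (Spec_get_subdirectory operation_name out) := by unfold Spec_get_subdirectory; infer_instance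

-- ===== CLAIM (what is proved, stated in full; the proofs are below) =====
def Claim_equal_get_subdirectory : Prop := ∀ (operation_name : Option String), Dom_get_subdirectory operation_name → Spec_get_subdirectory operation_name (get_subdirectory operation_name)

-- ===== LEMMAS AND PROOFS =====

-- A reference splitter: mySplit pre l is Python l.split(".") with pre prepended to the first word.
def mySplit (pre : List Char) : List Char → List (List Char)
  | [] => [pre]
  | c :: rest => if c = '.' then pre :: mySplit [] rest else mySplit (pre ++ [c]) rest

lemma splitOn_go_eq (fuel : Nat) : ∀ (l cur : List Char) (acc : List (List Char)), l.length < fuel →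
    PySem.Chars.splitOn.go ['.'] fuel l cur acc = acc.reverse ++ mySplit cur.reverse l := by
  induction fuel with
  | zero => intro l cur acc h; omega
  | succ n ih =>
    intro l cur acc h
    match l with
    | [] => simp [PySem.Chars.splitOn.go, mySplit]
    | c :: rest =>
      by_cases hc : c = '.'
      · subst hc
        rw [PySem.Chars.splitOn.go]
        have hp : List.isPrefixOf ['.'] ('.' :: rest) = true := by
          simp [List.isPrefixOf]
        rw [if_pos hp]
        rw [ih _ _ _ (by simpa using Nat.lt_of_succ_lt_succ h)]
        simp [mySplit]
      · rw [PySem.Chars.splitOn.go]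
        have hp : List.isPrefixOf ['.'] (c :: rest) = false := by
          simp [List.isPrefixOf]; exact fun h' => absurd h'.symm hc
        rw [if_neg (by simp [hp])]
        rw [ih _ _ _ (by simpa using Nat.lt_of_succ_lt_succ h)]
        simp [mySplit, hc]

lemma splitOn_eq_mySplit (cs : List Char) : PySem.Chars.splitOn cs ['.'] = mySplit [] cs := by
  unfold PySem.Chars.splitOn
  simpa using splitOn_go_eq (cs.length + 1) cs [] [] (by omega)

lemma mySplit_ne_nil (l : List Char) (pre : List Char) : mySplit pre l ≠ [] := by
  induction l generalizing pre with
  | nil => simp [mySplit]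
  | cons c rest ih => by_cases hc : c = '.' <;> simp [mySplit, hc, ih]

lemma join_cons (x : List Char) (ys : List (List Char)) (h : ys ≠ []) :
    PySem.Chars.join ['.'] (x :: ys) = x ++ '.' :: PySem.Chars.join ['.'] ys := by
  cases ys with
  | nil => exact absurd rfl h
  | cons y ys' => rw [PySem.Chars.join_cons_cons]; simp

lemma join_mySplit (l : List Char) : ∀ pre, PySem.Chars.join ['.'] (mySplit pre l) = pre ++ l := by
  induction l with
  | nil => intro pre; simp [mySplit, PySem.Chars.join_singleton]
  | cons c rest ih =>
    intro pre
    by_cases hc : c = '.'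
    · subst hc
      rw [mySplit, if_pos rfl, join_cons _ _ (mySplit_ne_nil _ _), ih]
      simp
    · rw [mySplit, if_neg hc, ih]
      simp

lemma mySplit_no_dot (l : List Char) : ∀ pre, '.' ∉ l → mySplit pre l = [pre ++ l] := by
  induction l with
  | nil => intro pre _; simp [mySplit]
  | cons c rest ih =>
    intro pre h
    have hc : c ≠ '.' := fun hh => h (by simp [hh])
    rw [mySplit, if_neg hc, ih _ (fun hh => h (by simp [hh]))]
    simp

lemma mySplit_dot (w0 : List Char) : ∀ pre (t : List Char), '.' ∉ w0 →
    mySplit pre (w0 ++ '.' :: t) = (pre ++ w0) :: mySplit [] t := by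
  induction w0 with
  | nil => intro pre t _; simp [mySplit]
  | cons c w ih =>
    intro pre t h
    have hc : c ≠ '.' := fun hh => h (by simp [hh])
    rw [List.cons_append, mySplit, if_neg hc, ih _ _ (fun hh => h (by simp [hh]))]
    simp

lemma mySplit_concat (l : List Char) : ∀ pre, '.' ∉ pre →
    ∃ m2 wl, mySplit pre l = m2 ++ [wl] ∧ '.' ∉ wl := by
  induction l with
  | nil => intro pre h; exact ⟨[], pre, by simp [mySplit], h⟩
  | cons c rest ih =>
    intro pre h
    by_cases hc : c = '.'
    · subst hc
      obtain ⟨m2, wl, he, hw⟩ := ih [] (by simp)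
      exact ⟨pre :: m2, wl, by simp [mySplit, he], hw⟩
    · obtain ⟨m2, wl, he, hw⟩ := ih (pre ++ [c]) (by simp [h]; exact fun hh => hc hh.symm)
      exact ⟨m2, wl, by simp [mySplit, hc, he], hw⟩

lemma exists_dot_split (cs : List Char) (h : '.' ∈ cs) :
    ∃ w0 t, cs = w0 ++ '.' :: t ∧ '.' ∉ w0 := by
  induction cs with
  | nil => simp at h
  | cons c rest ih =>
    by_cases hc : c = '.'
    · exact ⟨[], rest, by simp [hc], by simp⟩
    · have : '.' ∈ rest := by
        rcases List.mem_cons.mp h with h1 | h1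
        · exact absurd h1.symm hc
        · exact h1
      obtain ⟨w0, t, he, hw⟩ := ih this
      exact ⟨c :: w0, t, by simp [he], by simp [hw]; exact fun hh => hc hh.symm⟩

lemma find_go_dot (w0 : List Char) : ∀ (t : List Char) (k : Nat), '.' ∉ w0 →
    PySem.Chars.find.go ['.'] (w0 ++ '.' :: t) k = (k : Int) + w0.length := by
  induction w0 with
  | nil =>
    intro t k _
    rw [List.nil_append, PySem.Chars.find.go]
    simp [List.isPrefixOf]
  | cons c w ih =>
    intro t k h
    have hc : c ≠ '.' := fun hh => h (by simp [hh])
    rw [List.cons_append, PySem.Chars.find.go]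
    have hp : List.isPrefixOf ['.'] (c :: (w ++ '.' :: t)) = false := by
      simp [List.isPrefixOf]; exact fun h' => absurd h'.symm hc
    rw [if_neg (by simp [hp])]
    rw [ih t (k + 1) (fun hh => h (by simp [hh]))]
    simp only [List.length_cons]
    push_cast; ring

lemma find_dot (w0 t : List Char) (h : '.' ∉ w0) :
    PySem.Chars.find (w0 ++ '.' :: t) ['.'] = (w0.length : Int) := by
  unfold PySem.Chars.find
  rw [find_go_dot w0 t 0 h]; simp

lemma not_prefix_of_not_mem {w : List Char} (h : '.' ∉ w) {l : List Char} (hl : l <:+ w) :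
    List.isPrefixOf ['.'] l = false := by
  by_contra hb
  have hp : ['.'] <+: l := List.isPrefixOf_iff_prefix.mp (by revert hb; cases List.isPrefixOf ['.'] l <;> simp)
  exact h (hl.subset (hp.subset (by simp)))

lemma rfind_go_dot (r w : List Char) (h : '.' ∉ w) : ∀ (j : Nat), r.length ≤ j →
    PySem.Chars.rfind.go (r ++ '.' :: w) ['.'] j = (r.length : Int) := by
  intro j
  induction j with
  | zero =>
    intro hj
    have hr : r = [] := List.eq_nil_of_length_eq_zero (Nat.le_zero.mp hj)
    subst hr
    rw [PySem.Chars.rfind.go]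
    simp [List.isPrefixOf]
  | succ j ih =>
    intro hj
    rcases Nat.lt_or_ge r.length (j + 1) with hlt | hge
    · -- j + 1 > r.length : position j+1 is past the dot, inside w, no match
      rw [PySem.Chars.rfind.go]
      have h1 : j + 1 = r.length + (j + 1 - r.length) := by omega
      have hd2 : List.drop (j + 1) (r ++ '.' :: w) = List.drop (j - r.length) w := by
        rw [List.drop_append]
        rw [List.drop_eq_nil_of_le (show r.length ≤ j + 1 by omega)]
        have hsub : j + 1 - r.length = (j - r.length) + 1 := by omega
        rw [hsub, List.drop_succ_cons, List.nil_append]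
      rw [hd2, not_prefix_of_not_mem h (List.drop_suffix _ _)]
      simpa using ih (by omega)
    · -- j + 1 = r.length : the dot is right there
      have hj1 : j + 1 = r.length := by omega
      rw [PySem.Chars.rfind.go]
      have : List.drop (j + 1) (r ++ '.' :: w) = '.' :: w := by
        rw [hj1, List.drop_left]
      rw [this]
      simp [List.isPrefixOf, hj1]

lemma rfind_dot (r w : List Char) (h : '.' ∉ w) :
    PySem.Chars.rfind (r ++ '.' :: w) ['.'] = (r.length : Int) := by
  unfold PySem.Chars.rfind
  exact rfind_go_dot r w h _ (by simp)

lemma foldL (g : Int → List Char) : ∀ (k : Nat) (a : Int) (acc : List Char),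
    (PySem.List.pyRange a (a + k) 1).foldl
      (fun dir iw =>
        if iw < a + (k : Int) - 1 then dir ++ g iw ++ ['.'] else dir ++ g iw) acc
    = acc ++ PySem.Chars.join ['.'] ((PySem.List.pyRange a (a + k) 1).map g) := by
  intro k
  induction k with
  | zero =>
    intro a acc
    have : PySem.List.pyRange a (a + (0 : Nat)) 1 = [] := by
      simp [PySem.List.pyRange]
    simp [PySem.Chars.join_nil]
  | succ k ih =>
    intro a acc
    have hcons : PySem.List.pyRange a (a + ((k : Nat) + 1 : Nat)) 1
        = a :: PySem.List.pyRange (a + 1) (a + ((k : Nat) + 1 : Nat)) := by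
      exact PySem.List.pyRange_one_cons (by push_cast; omega)
    rw [hcons]
    rcases Nat.eq_zero_or_pos k with hk | hk
    · subst hk
      have hnil : PySem.List.pyRange (a + 1) (a + ((0 : Nat) + 1 : Nat)) = [] := by
        have : a + (((0 : Nat) + 1 : Nat) : Int) = a + 1 := by push_cast; ring
        rw [this]; simp [PySem.List.pyRange]
      rw [hnil]
      simp only [List.foldl_cons, List.foldl_nil, List.map_cons, List.map_nil]
      rw [if_neg (by push_cast; omega), PySem.Chars.join_singleton]
    · have hlt : (a : Int) < a + (k : Int) + 1 - 1 := by push_cast; omega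
      simp only [List.foldl_cons, List.map_cons]
      rw [if_pos (by push_cast at hlt ⊢; omega)]
      have harg : a + (((k : Nat) + 1 : Nat) : Int) = (a + 1) + (k : Nat) := by push_cast; ring
      have hcond : ∀ iw : Int, (iw < a + (((k:Nat) + 1 : Nat) : Int) - 1) = (iw < (a + 1) + (k : Int) - 1) := by
        intro iw; congr 1; push_cast; ring
      rw [harg]
      have := ih (a + 1) ((acc ++ g a) ++ ['.'])
      simp only [hcond] at *
      rw [this]
      have hne : (PySem.List.pyRange (a + 1) ((a + 1) + (k : Nat)) 1).map g ≠ [] := by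
        rw [PySem.List.pyRange_one_cons (by push_cast; omega)]
        simp
      rw [join_cons _ _ hne]
      simp

lemma pyRange_one_succ (m : Nat) :
    PySem.List.pyRange 1 (1 + (m : Int)) 1 = (List.range m).map (fun j : Nat => ((1 + j : Nat) : Int)) := by
  induction m with
  | zero => norm_num
  | succ k ih =>
    have hsplit : PySem.List.pyRange 1 (1 + ((k + 1 : Nat) : Int)) 1
        = PySem.List.pyRange 1 (1 + (k : Int)) 1 ++ PySem.List.pyRange (1 + (k : Int)) (1 + ((k + 1 : Nat) : Int)) 1 := by
      exact PySem.List.pyRange_one_append _ _ _ (by push_cast; omega) (by push_cast; omega)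
    rw [hsplit, ih]
    have hone : PySem.List.pyRange (1 + (k : Int)) (1 + ((k + 1 : Nat) : Int)) 1
        = [1 + (k : Int)] := by
      rw [PySem.List.pyRange_one_cons (by push_cast; omega)]
      have : PySem.List.pyRange (1 + (k : Int) + 1) (1 + ((k + 1 : Nat) : Int)) 1 = [] := by
        have he : (1 : Int) + ((k + 1 : Nat) : Int) = 1 + (k : Int) + 1 := by push_cast; ring
        rw [he]; simp [PySem.List.pyRange]
      rw [this]
    rw [hone, List.range_succ, List.map_append]
    simp

lemma map_getD_range (mid : List (List Char)) :
    (List.range mid.length).map (fun j => mid.getD j []) = mid := by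
  apply List.ext_getElem
  · simp
  · intro i h1 h2
    simp [List.getD_eq_getElem?_getD, List.getElem?_eq_getElem (by simpa using h2)]

lemma foldA (w0 wl : List Char) (mid : List (List Char)) :
    (PySem.List.pyRange 1 ((((w0 :: (mid ++ [wl])).length : Nat) : Int) - 1) 1).foldl
      (fun dir iw =>
        if iw < (((w0 :: (mid ++ [wl])).length : Nat) : Int) - 2 then
          dir ++ PySem.List.pyGetD (w0 :: (mid ++ [wl])) iw [] ++ ['.']
        else dir ++ PySem.List.pyGetD (w0 :: (mid ++ [wl])) iw []) []
    = PySem.Chars.join ['.'] mid := by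
  set full := w0 :: (mid ++ [wl]) with hfull
  have hlen : ((full.length : Nat) : Int) = (mid.length : Int) + 2 := by
    simp [hfull]; push_cast; ring
  have hb : ((full.length : Nat) : Int) - 1 = 1 + (mid.length : Int) := by rw [hlen]; ring
  have hc : ∀ iw : Int, (iw < ((full.length : Nat) : Int) - 2) = (iw < 1 + (mid.length : Int) - 1) := by
    intro iw; rw [hlen]; congr 1; ring
  simp only [hb, hc]
  have h1 : (1 : Int) + (mid.length : Int) = 1 + (mid.length : Nat) := by push_cast; ring
  rw [h1, foldL (fun iw => PySem.List.pyGetD full iw []) mid.length 1 []]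
  rw [← h1, pyRange_one_succ]
  rw [List.map_map]
  have hmap : ((List.range mid.length).map ((fun iw => PySem.List.pyGetD full iw []) ∘ fun j : Nat => ((1 + j : Nat) : Int)))
      = (List.range mid.length).map (fun j => mid.getD j []) := by
    apply List.map_congr_left
    intro j hj
    have hj' : j < mid.length := by simpa using hj
    simp only [Function.comp]
    rw [PySem.List.pyGetD_natCast]
    rw [hfull]
    have : (1 + j) = j + 1 := by omega
    rw [this, List.getD_cons_succ]
    exact List.getD_append _ _ _ _ hj'
  rw [hmap, map_getD_range]
  simp

lemma join_concat (y : List Char) (ys : List (List Char)) (wl : List Char) :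
    PySem.Chars.join ['.'] ((y :: ys) ++ [wl]) = PySem.Chars.join ['.'] (y :: ys) ++ '.' :: wl := by
  induction ys generalizing y with
  | nil => simp [PySem.Chars.join_cons_cons, PySem.Chars.join_singleton]
  | cons z zs ih =>
    rw [List.cons_append, join_cons y _ (by simp), ih z, PySem.Chars.join_cons_cons]
    simp

lemma core_eq (cs : List Char) : get_subdirectory_core cs = get_subdirectory_alt_core cs := by
  unfold get_subdirectory_core get_subdirectory_alt_core
  by_cases hmem : '.' ∈ cs
  · obtain ⟨w0, t, rfl, hw0⟩ := exists_dot_split cs hmem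
    obtain ⟨m2, wl, hms, hwl⟩ := mySplit_concat t [] (by simp)
    have hfind := find_dot w0 t hw0
    have hne : PySem.Chars.find (w0 ++ '.' :: t) ['.'] ≠ -1 := by rw [hfind]; omega
    rw [splitOn_eq_mySplit, mySplit_dot w0 [] t hw0, hms, hfind, if_neg (by omega)]
    cases m2 with
    | nil =>
      have ht : t = wl := by
        have h2 := join_mySplit t []
        rw [hms] at h2
        simpa [PySem.Chars.join_singleton] using h2.symm
      subst ht
      have hrf := rfind_dot w0 t hwl
      rw [hrf]
      simp only [List.nil_append, List.length_cons, List.length_nil]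
      norm_num
      rw [PySem.List.slice_toNat _ (by omega) (by omega)]
      have h1 : ((w0.length : Int) + 1).toNat = w0.length + 1 := by omega
      have h2 : ((w0.length : Int)).toNat = w0.length := by omega
      have h3 : w0.length - (w0.length + 1) = 0 := by omega
      rw [h1, h2, h3]
      simp
    | cons y ys =>
      have ht : t = PySem.Chars.join ['.'] (y :: ys) ++ '.' :: wl := by
        have h2 := join_mySplit t []
        rw [hms, join_concat y ys wl] at h2
        simpa using h2.symm
      have hcs : w0 ++ '.' :: t = (w0 ++ '.' :: PySem.Chars.join ['.'] (y :: ys)) ++ '.' :: wl := by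
        rw [ht]; simp
      have hrf : PySem.Chars.rfind (w0 ++ '.' :: t) ['.']
          = ((w0 ++ '.' :: PySem.Chars.join ['.'] (y :: ys)).length : Int) := by
        rw [hcs]; exact rfind_dot _ wl hwl
      rw [hrf]
      simp only [List.nil_append]
      rw [foldA w0 wl (y :: ys)]
      -- B side: the slice is exactly join ['.'] (y :: ys)
      rw [PySem.Chars.slice_eq_listSlice,
        PySem.List.slice_toNat _ (by omega) (by omega)]
      have hlen : ((w0 ++ '.' :: PySem.Chars.join ['.'] (y :: ys)).length : Int)
          = (w0.length : Int) + 1 + (PySem.Chars.join ['.'] (y :: ys)).length := by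
        simp; push_cast; ring
      have h1 : ((w0.length : Int) + 1).toNat = w0.length + 1 := by omega
      have h2 : (((w0 ++ '.' :: PySem.Chars.join ['.'] (y :: ys)).length : Int)).toNat
          = w0.length + 1 + (PySem.Chars.join ['.'] (y :: ys)).length := by
        rw [hlen]; omega
      rw [h1, h2]
      have hdrop : List.drop (w0.length + 1) (w0 ++ '.' :: t)
          = PySem.Chars.join ['.'] (y :: ys) ++ '.' :: wl := by
        rw [show w0 ++ '.' :: t = (w0 ++ ['.']) ++ t by simp,
          show w0.length + 1 = (w0 ++ ['.']).length by simp,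
          List.drop_left, ht]
      rw [hdrop]
      have htake : w0.length + 1 + (PySem.Chars.join ['.'] (y :: ys)).length - (w0.length + 1)
          = (PySem.Chars.join ['.'] (y :: ys)).length := by omega
      rw [htake, List.take_left]
  · have hfind : PySem.Chars.find cs ['.'] = -1 := by
      rw [PySem.Chars.find_eq_neg_one_iff]
      exact fun hin => hmem (hin.subset (by simp))
    rw [splitOn_eq_mySplit, mySplit_no_dot cs [] hmem, hfind, if_pos rfl]
    simp only [List.nil_append, List.length_cons, List.length_nil]
    norm_num

-- ===== VERDICT (by name: the statement is the Claim_ definition above) =====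
theorem get_subdirectory_spec : Claim_equal_get_subdirectory := by
  intro op _
  unfold Spec_get_subdirectory
  cases op with
  | none => rfl
  | some s => simp [get_subdirectory, get_subdirectory_alt, core_eq]
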